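-- pv_equiv track=rewrite | github.com/scirusvulgaris/COMPLEX | johnson_algo (1).py | calc_time
-- ===== SOURCE A (Python) =====
-- def calc_time(tasks):
--     m1=tasks[0][0]
--     m2=m1+tasks[0][1]
--     for i in range(1,len(tasks)):
--         m1=m1+tasks[i][0]
--         if m1<m2:
--             m2=m2+tasks[i][1] #m2+ curr task de m2
--         else:
--             m2=m1+tasks[i][1] #m1+ curr task de m2
--     return m2
-- ===== SOURCE B (Python) =====
-- def calc_time(tasks):
--     # Closed form: makespan = max over split points k of
--     #   (sum of machine-1 times a[0..k]) + (sum of machine-2 times b[k..n-1])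
--     prefix = []
--     s = 0
--     for a, _ in tasks:
--         s += a
--         prefix.append(s)
--     suffix = [0] * len(tasks)
--     t = 0
--     for k in range(len(tasks) - 1, -1, -1):
--         t += tasks[k][1]
--         suffix[k] = t
--     return max(p + q for p, q in zip(prefix, suffix))
-- ===== Notes on version B (the rewrite author's own statement) =====
-- stated objective: alternative
-- what changed: Replaced the forward DP recurrence m2 = max(m1,m2)+b by the closed form: prefix sums of machine-1 times and suffix sums of machine-2 times are built in two passes, and the makespan is the maximum of prefix[k]+suffix[k] over all split points k.
import Mathlib
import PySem

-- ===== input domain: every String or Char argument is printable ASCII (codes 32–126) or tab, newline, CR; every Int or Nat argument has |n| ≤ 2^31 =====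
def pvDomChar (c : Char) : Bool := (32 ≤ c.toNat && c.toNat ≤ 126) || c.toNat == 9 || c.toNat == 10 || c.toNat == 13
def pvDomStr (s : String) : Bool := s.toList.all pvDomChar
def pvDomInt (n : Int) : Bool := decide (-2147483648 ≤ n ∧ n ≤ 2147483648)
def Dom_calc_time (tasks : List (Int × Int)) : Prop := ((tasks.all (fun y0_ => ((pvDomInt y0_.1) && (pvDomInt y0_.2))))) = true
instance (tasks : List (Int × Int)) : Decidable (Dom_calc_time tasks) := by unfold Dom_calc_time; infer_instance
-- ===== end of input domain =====

-- B replaces A's forward DP by the prefix-sum/suffix-sum closed form; same cost, different shape.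

-- ===== PORT A =====
-- A's loop over range(1,len(tasks)) with running state (m1,m2); on [] A raises
-- IndexError (excluded by Pre_), the port returns 0 there.
def stepA (s t : Int × Int) : Int × Int :=
  let m1 := s.1 + t.1
  if m1 < s.2 then (m1, s.2 + t.2) else (m1, m1 + t.2)

def calc_time (tasks : List (Int × Int)) : Int :=
  match tasks with
  | [] => 0
  | t0 :: rest => (rest.foldl stepA (t0.1, t0.1 + t0.2)).2

-- ===== PORT B =====
-- Source B: forward pass building the prefix list, backward pass building the
-- suffix list, then max over the zipped sums; on [] Source B's max raises
-- ValueError (excluded by Pre_), the port returns 0 there.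
def calc_time_alt (tasks : List (Int × Int)) : Int :=
  let prefs := (tasks.foldl (fun (st : Int × List Int) t =>
      (st.1 + t.1, st.2 ++ [st.1 + t.1])) (0, ([] : List Int))).2
  let sufs := (tasks.foldr (fun t (st : Int × List Int) =>
      (st.1 + t.2, (st.1 + t.2) :: st.2)) (0, ([] : List Int))).2
  match (List.zip prefs sufs).map (fun p => p.1 + p.2) with
  | [] => 0
  | x :: xs => xs.foldl max x

-- ===== PRECONDITION & SPEC =====
-- Pre_ excludes only the empty list, on which A raises IndexError (and Source B raises ValueError).
def Pre_calc_time (tasks : List (Int × Int)) : Prop := tasks ≠ []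
instance (tasks : List (Int × Int)) : Decidable (Pre_calc_time tasks) := by unfold Pre_calc_time; infer_instance
def pvWitness_calc_time : (List (Int × Int)) := [(2, 3), (1, 4)]
def Spec_calc_time (tasks : List (Int × Int)) (out : Int) : Prop := out = calc_time_alt tasks
instance (tasks : List (Int × Int)) (out : Int) : Decidable (Spec_calc_time tasks out) := by unfold Spec_calc_time; infer_instance

-- ===== CLAIM (what is proved, stated in full; the proofs are below) =====
def Claim_equal_calc_time : Prop := ∀ (tasks : List (Int × Int)), Dom_calc_time tasks → Pre_calc_time tasks → Spec_calc_time tasks (calc_time tasks)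

-- ===== LEMMAS AND PROOFS =====

-- sum of the machine-2 times
def sumB : List (Int × Int) → Int
  | [] => 0
  | t :: l => sumB l + t.2

-- candidate list: for each task after the first, prefix-so-far + its a + its b + remaining b's
def candList : Int → List (Int × Int) → List Int
  | _, [] => []
  | m1, t :: l => (m1 + t.1 + t.2 + sumB l) :: candList (m1 + t.1) l

-- prefix sums starting from s
def prefList : Int → List (Int × Int) → List Int
  | _, [] => []
  | s, t :: l => (s + t.1) :: prefList (s + t.1) l

-- suffix sums of machine-2 times
def sufList : List (Int × Int) → List Int
  | [] => []
  | t :: l => (sumB l + t.2) :: sufList l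

theorem stepA_eq (s t : Int × Int) :
    stepA s t = (s.1 + t.1, max (s.1 + t.1) s.2 + t.2) := by
  simp only [stepA]
  split_ifs with h <;> simp <;> omega

theorem foldA_cands (l : List (Int × Int)) : ∀ (m1 m2 : Int),
    (l.foldl stepA (m1, m2)).2 = (candList m1 l).foldl max (m2 + sumB l) := by
  induction l with
  | nil => intro m1 m2; simp [candList, sumB]
  | cons t l ih =>
    intro m1 m2
    rw [List.foldl_cons, stepA_eq, ih]
    simp only [candList, sumB, List.foldl_cons]
    congr 1
    omega

theorem foldB_prefix (l : List (Int × Int)) : ∀ (s : Int) (acc : List Int),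
    (l.foldl (fun (st : Int × List Int) t =>
        (st.1 + t.1, st.2 ++ [st.1 + t.1])) (s, acc)).2 = acc ++ prefList s l := by
  induction l with
  | nil => intro s acc; simp [prefList]
  | cons t l ih => intro s acc; simp [prefList, ih, List.append_assoc]

theorem foldB_suffix (l : List (Int × Int)) :
    (l.foldr (fun t (st : Int × List Int) =>
        (st.1 + t.2, (st.1 + t.2) :: st.2)) (0, ([] : List Int)))
      = (sumB l, sufList l) := by
  induction l with
  | nil => simp [sumB, sufList]
  | cons t l ih => simp [List.foldr, ih, sumB, sufList]

theorem zip_pref_suf (l : List (Int × Int)) : ∀ (s : Int),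
    (List.zip (prefList s l) (sufList l)).map (fun p => p.1 + p.2) = candList s l := by
  induction l with
  | nil => intro s; simp [prefList, sufList, candList]
  | cons t l ih =>
    intro s
    simp only [prefList, sufList, candList, List.zip_cons_cons, List.map]
    rw [ih]
    congr 1
    ring

theorem calc_time_alt_cons (t0 : Int × Int) (rest : List (Int × Int)) :
    calc_time_alt (t0 :: rest)
      = (candList t0.1 rest).foldl max (t0.1 + (sumB rest + t0.2)) := by
  unfold calc_time_alt
  rw [foldB_suffix, foldB_prefix]
  simp only [List.nil_append]
  rw [show prefList 0 (t0 :: rest) = (0 + t0.1) :: prefList (0 + t0.1) rest from rfl]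
  rw [show sufList (t0 :: rest) = (sumB rest + t0.2) :: sufList rest from rfl]
  simp only [List.zip_cons_cons, List.map, zero_add]
  rw [zip_pref_suf rest t0.1]

-- ===== VERDICT (by name: the statement is the Claim_ definition above) =====
theorem calc_time_spec : Claim_equal_calc_time := by
  intro tasks _ hpre
  unfold Spec_calc_time
  match tasks with
  | [] => exact absurd rfl hpre
  | t0 :: rest =>
    rw [calc_time_alt_cons]
    show (rest.foldl stepA (t0.1, t0.1 + t0.2)).2 = _
    rw [foldA_cands]
    congr 1
    omega
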